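-- pv_equiv track=rewrite | github.com/sherlie2005/interactive_concept_map_generator | cs_cme/cs_cme_engine.py | normalize_to_concept
-- ===== SOURCE A (Python) =====
-- def normalize_to_concept(term, concepts):
--     term_lower = term.lower()
--
--     for c in concepts:
--         if term_lower == c.lower():
--             return c
--
--     for c in concepts:
--         if term_lower in c.lower():
--             return c
--
--     for c in concepts:
--         if c.lower() in term_lower:
--             return c
--
--     return term
-- ===== SOURCE B (Python) =====
-- def normalize_to_concept(term, concepts):
--     tl = term.lower()
--
--     def score(c):
--         cl = c.lower()
--         if tl == cl:
--             return 3
--         if tl in cl: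
--             return 2
--         if cl in tl:
--             return 1
--         return 0
--
--     best = None  # (score, concept), first concept attaining the maximal positive score
--     for c in concepts:
--         s = score(c)
--         if s and (best is None or s > best[0]):
--             best = (s, c)
--     return best[1] if best else term
-- ===== Notes on version B (the rewrite author's own statement) =====
-- stated objective: alternative
-- what changed: A's three staged predicate scans are replaced by a numeric ranking (3 exact / 2 term-in-concept / 1 concept-in-term / 0) and a single first-argmax scan that keeps the first concept attaining the maximal positive score.
import Mathlib
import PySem

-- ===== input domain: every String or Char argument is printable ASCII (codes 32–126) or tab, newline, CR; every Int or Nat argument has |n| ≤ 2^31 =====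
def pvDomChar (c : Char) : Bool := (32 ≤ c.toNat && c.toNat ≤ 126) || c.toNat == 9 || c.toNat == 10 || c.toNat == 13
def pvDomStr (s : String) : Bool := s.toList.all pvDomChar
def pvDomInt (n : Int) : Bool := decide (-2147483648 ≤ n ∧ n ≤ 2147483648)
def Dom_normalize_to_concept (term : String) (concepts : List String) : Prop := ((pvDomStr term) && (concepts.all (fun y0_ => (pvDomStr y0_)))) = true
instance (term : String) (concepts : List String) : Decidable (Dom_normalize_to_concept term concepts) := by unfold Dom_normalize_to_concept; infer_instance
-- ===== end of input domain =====

-- B replaces A's three staged scans by a numeric rank (3/2/1/0) and a single first-argmax scan (objective: alternative).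

-- ===== PORT A =====
-- each 'for c in concepts: if p(c): return c' loop is List.find? with that predicate, in A's order
def normalize_to_concept (term : String) (concepts : List String) : String :=
  let term_lower := PySem.Str.lower term
  match concepts.find? (fun c => term_lower == PySem.Str.lower c) with
  | some c => c
  | none =>
    match concepts.find? (fun c => PySem.Str.isIn term_lower (PySem.Str.lower c)) with
    | some c => c
    | none =>
      match concepts.find? (fun c => PySem.Str.isIn (PySem.Str.lower c) term_lower) with
      | some c => c
      | none => term

-- ===== PORT B =====
-- Source B's score(c): 3 exact, 2 term-in-concept, 1 concept-in-term, 0 otherwise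
def pvScore (tl c : String) : Int :=
  if tl == PySem.Str.lower c then 3
  else if PySem.Str.isIn tl (PySem.Str.lower c) then 2
  else if PySem.Str.isIn (PySem.Str.lower c) tl then 1
  else 0

-- Source B's loop: keep the first concept attaining the maximal positive score
def pvBest (tl : String) (l : List String) (best : Option (Int × String)) : Option (Int × String) :=
  match l with
  | [] => best
  | c :: t =>
    let s := pvScore tl c
    if s != 0 && (match best with | none => true | some b => decide (s > b.1)) then
      pvBest tl t (some (s, c))
    else
      pvBest tl t best

def normalize_to_concept_alt (term : String) (concepts : List String) : String :=
  let tl := PySem.Str.lower term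
  match pvBest tl concepts none with
  | some b => b.2
  | none => term

-- ===== PRECONDITION & SPEC =====
def Spec_normalize_to_concept (term : String) (concepts : List String) (out : String) : Prop := out = normalize_to_concept_alt term concepts
instance (term : String) (concepts : List String) (out : String) : Decidable (Spec_normalize_to_concept term concepts out) := by unfold Spec_normalize_to_concept; infer_instance

-- ===== CLAIM (what is proved, stated in full; the proofs are below) =====
def Claim_equal_normalize_to_concept : Prop := ∀ (term : String) (concepts : List String), Dom_normalize_to_concept term concepts → Spec_normalize_to_concept term concepts (normalize_to_concept term concepts)

-- ===== LEMMAS AND PROOFS =====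

theorem pvScore_le3 (tl c : String) : pvScore tl c ≤ 3 := by
  unfold pvScore; split_ifs <;> omega

theorem pvScore_exact (tl c : String) (h : (tl == PySem.Str.lower c) = true) :
    pvScore tl c = 3 := by
  unfold pvScore; rw [if_pos h]

theorem pvScore_sub1 (tl c : String) (h3 : (tl == PySem.Str.lower c) = false)
    (h2 : PySem.Str.isIn tl (PySem.Str.lower c) = true) : pvScore tl c = 2 := by
  unfold pvScore
  rw [if_neg (by rw [h3]; exact Bool.false_ne_true), if_pos h2]

theorem pvScore_sub2 (tl c : String) (h3 : (tl == PySem.Str.lower c) = false)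
    (h2 : PySem.Str.isIn tl (PySem.Str.lower c) = false)
    (h1 : PySem.Str.isIn (PySem.Str.lower c) tl = true) : pvScore tl c = 1 := by
  unfold pvScore
  rw [if_neg (by rw [h3]; exact Bool.false_ne_true),
      if_neg (by rw [h2]; exact Bool.false_ne_true), if_pos h1]

theorem pvScore_zero (tl c : String) (h3 : (tl == PySem.Str.lower c) = false)
    (h2 : PySem.Str.isIn tl (PySem.Str.lower c) = false)
    (h1 : PySem.Str.isIn (PySem.Str.lower c) tl = false) : pvScore tl c = 0 := by
  unfold pvScore
  rw [if_neg (by rw [h3]; exact Bool.false_ne_true),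
      if_neg (by rw [h2]; exact Bool.false_ne_true),
      if_neg (by rw [h1]; exact Bool.false_ne_true)]

theorem pvScore_no3 (tl c : String) (h3 : (tl == PySem.Str.lower c) = false) :
    pvScore tl c ≤ 2 := by
  unfold pvScore
  rw [if_neg (by rw [h3]; exact Bool.false_ne_true)]
  split_ifs <;> omega

theorem pvScore_no32 (tl c : String) (h3 : (tl == PySem.Str.lower c) = false)
    (h2 : PySem.Str.isIn tl (PySem.Str.lower c) = false) : pvScore tl c ≤ 1 := by
  unfold pvScore
  rw [if_neg (by rw [h3]; exact Bool.false_ne_true),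
      if_neg (by rw [h2]; exact Bool.false_ne_true)]
  split_ifs <;> omega

theorem pvBest_append (tl : String) (l1 l2 : List String) (b : Option (Int × String)) :
    pvBest tl (l1 ++ l2) b = pvBest tl l2 (pvBest tl l1 b) := by
  induction l1 generalizing b with
  | nil => simp [pvBest]
  | cons c t ih =>
    simp only [List.cons_append, pvBest]
    split_ifs <;> exact ih _

-- no element of l can beat a stored best of score s
theorem pvBest_stable (tl : String) (l : List String) (s : Int) (c₀ : String)
    (h : ∀ c ∈ l, pvScore tl c ≤ s) : pvBest tl l (some (s, c₀)) = some (s, c₀) := by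
  induction l with
  | nil => rfl
  | cons c t ih =>
    have hc := h c (by simp)
    simp only [pvBest]
    rw [if_neg (by
      simp only [Bool.and_eq_true, bne_iff_ne, decide_eq_true_eq, not_and]
      intro _; omega)]
    exact ih (fun c' hc' => h c' (by simp [hc']))

-- scores bounded by k keep the best bounded by k (or absent)
theorem pvBest_le (tl : String) (l : List String) (b : Option (Int × String)) (k : Int)
    (hb : b = none ∨ ∃ p, b = some p ∧ p.1 ≤ k)
    (h : ∀ c ∈ l, pvScore tl c ≤ k) :
    pvBest tl l b = none ∨ ∃ p, pvBest tl l b = some p ∧ p.1 ≤ k := by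
  induction l generalizing b with
  | nil => simpa [pvBest] using hb
  | cons c t ih =>
    simp only [pvBest]
    have hc := h c (by simp)
    have ht : ∀ c' ∈ t, pvScore tl c' ≤ k := fun c' hc' => h c' (by simp [hc'])
    split_ifs with hcond
    · exact ih _ (Or.inr ⟨(pvScore tl c, c), rfl, hc⟩) ht
    · exact ih _ hb ht

-- all-zero scores never set a best
theorem pvBest_zeros (tl : String) (l : List String)
    (h : ∀ c ∈ l, pvScore tl c = 0) : pvBest tl l none = none := by
  induction l with
  | nil => rfl
  | cons c t ih =>
    simp only [pvBest]
    rw [if_neg (by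
      simp only [Bool.and_eq_true, bne_iff_ne, not_and]
      intro hne _; exact hne (h c (by simp)))]
    exact ih (fun c' hc' => h c' (by simp [hc']))

-- a candidate of score s beats any best bounded below s
theorem pvBest_promote (tl : String) (l2 : List String) (b : Option (Int × String))
    (s : Int) (c₀ : String) (hs : s ≠ 0)
    (hb : b = none ∨ ∃ p, b = some p ∧ p.1 < s)
    (hsc : pvScore tl c₀ = s)
    (h2 : ∀ c ∈ l2, pvScore tl c ≤ s) :
    pvBest tl (c₀ :: l2) b = some (s, c₀) := by
  rcases hb with rfl | ⟨p, rfl, hlt⟩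
  · simp only [pvBest, hsc]
    rw [if_pos (by simp [hs])]
    exact pvBest_stable tl l2 s c₀ h2
  · simp only [pvBest, hsc]
    rw [if_pos (by
      simp only [Bool.and_eq_true, bne_iff_ne, decide_eq_true_eq]
      exact ⟨hs, hlt⟩)]
    exact pvBest_stable tl l2 s c₀ h2

theorem find?_none_all {p : String → Bool} {l : List String} (h : l.find? p = none) :
    ∀ c ∈ l, p c = false := by
  intro c hc
  simpa using List.find?_eq_none.1 h c hc

-- ===== VERDICT (by name: the statement is the Claim_ definition above) =====
theorem normalize_to_concept_spec : Claim_equal_normalize_to_concept := by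
  intro term concepts _
  unfold Spec_normalize_to_concept normalize_to_concept normalize_to_concept_alt
  set tl := PySem.Str.lower term with htl
  simp only []
  cases h3 : concepts.find? (fun c => tl == PySem.Str.lower c) with
  | some c₀ =>
    -- an exact match exists: B's argmax is the first score-3 concept, which is c₀
    obtain ⟨l1, l2, rfl, hpre⟩ := List.find?_eq_some_iff_append.1 h3 |>.2
    have hpre' : ∀ c ∈ l1, pvScore tl c ≤ 2 :=
      fun c hc => pvScore_no3 tl c (by simpa using hpre c hc)
    rw [pvBest_append]
    have hb1 := pvBest_le tl l1 none 2 (Or.inl rfl) hpre'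
    rw [pvBest_promote tl l2 _ 3 c₀ (by omega) ?_
      (pvScore_exact tl c₀ (List.find?_eq_some_iff_append.1 h3).1)
      (fun c _ => pvScore_le3 tl c)]
    rcases hb1 with h | ⟨p, hp, hle⟩
    · exact Or.inl h
    · exact Or.inr ⟨p, hp, by omega⟩
  | none =>
    have hno3 := find?_none_all h3
    cases h2 : concepts.find? (fun c => PySem.Str.isIn tl (PySem.Str.lower c)) with
    | some c₀ =>
      obtain ⟨l1, l2, rfl, hpre⟩ := List.find?_eq_some_iff_append.1 h2 |>.2
      have hpre' : ∀ c ∈ l1, pvScore tl c ≤ 1 :=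
        fun c hc => pvScore_no32 tl c (hno3 c (by simp [hc])) (by simpa using hpre c hc)
      have hl2 : ∀ c ∈ l2, pvScore tl c ≤ 2 :=
        fun c hc => pvScore_no3 tl c (hno3 c (by simp [hc]))
      rw [pvBest_append]
      have hb1 := pvBest_le tl l1 none 1 (Or.inl rfl) hpre'
      rw [pvBest_promote tl l2 _ 2 c₀ (by omega) ?_
        (pvScore_sub1 tl c₀ (hno3 c₀ (by simp)) (List.find?_eq_some_iff_append.1 h2).1) hl2]
      rcases hb1 with h | ⟨p, hp, hle⟩
      · exact Or.inl h
      · exact Or.inr ⟨p, hp, by omega⟩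
    | none =>
      have hno2 := find?_none_all h2
      cases h1 : concepts.find? (fun c => PySem.Str.isIn (PySem.Str.lower c) tl) with
      | some c₀ =>
        obtain ⟨l1, l2, rfl, hpre⟩ := List.find?_eq_some_iff_append.1 h1 |>.2
        have hpre' : ∀ c ∈ l1, pvScore tl c = 0 := by
          intro c hc
          exact pvScore_zero tl c (hno3 c (by simp [hc])) (hno2 c (by simp [hc]))
            (by simpa using hpre c hc)
        have hl2 : ∀ c ∈ l2, pvScore tl c ≤ 1 :=
          fun c hc => pvScore_no32 tl c (hno3 c (by simp [hc])) (hno2 c (by simp [hc]))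
        rw [pvBest_append, pvBest_zeros tl l1 hpre']
        rw [pvBest_promote tl l2 none 1 c₀ (by omega) (Or.inl rfl)
          (pvScore_sub2 tl c₀ (hno3 c₀ (by simp)) (hno2 c₀ (by simp))
            (List.find?_eq_some_iff_append.1 h1).1) hl2]
      | none =>
        have hno1 := find?_none_all h1
        rw [pvBest_zeros tl concepts
          (fun c hc => pvScore_zero tl c (hno3 c hc) (hno2 c hc) (hno1 c hc))]
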